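-- pv_equiv track=rewrite | github.com/bmeszit/algolib | src/lib/code/hu/mindist/algo/dfs_topo_ellista.py | dfs
-- ===== SOURCE A (Python) =====
-- def dfs(G, s):
--   n = len(G)
--   mszam = [None]*n; bszam = [None]*n; elozo = [None]*n; kszom = [0]*n
--   mszam[s] = 1; MSZAM = 1; BSZAM = 0; v = s; kcsucs = 0
--   while True:
--     for i in range(kszom[v], len(G[v])):
--       u, _ = G[v][i]; kszom[v] = i+1
--       if mszam[u] is None:
--         MSZAM += 1; mszam[u] = MSZAM; elozo[u] = v; v = u; break
--       elif mszam[v] > mszam[u] and bszam[u] is None: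
--         raise Exception(f"Nem aciklikus a gráf! Megtalált visszaél: {v} -> {u}.")
--     else:
--       BSZAM += 1; bszam[v] = BSZAM
--       if elozo[v] != None: v = elozo[v]
--       else:
--         for w in range(kcsucs, n):
--           kcsucs = w+1
--           if mszam[w] is None:
--             MSZAM += 1; mszam[w] = MSZAM; v = w; break
--         else: break
--   return elozo, mszam, bszam
-- ===== SOURCE B (Python) =====
-- def dfs(G, s):
--     n = len(G)
--     mszam = [None]*n; bszam = [None]*n; elozo = [None]*n
--     cnt = [1, 0]  # [MSZAM, BSZAM]
--
--     def visit(v):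
--         for u, _ in G[v]:
--             if mszam[u] is None:
--                 cnt[0] += 1; mszam[u] = cnt[0]; elozo[u] = v
--                 visit(u)
--             elif mszam[v] > mszam[u] and bszam[u] is None:
--                 raise Exception(f"Nem aciklikus a gráf! Megtalált visszaél: {v} -> {u}.")
--         cnt[1] += 1; bszam[v] = cnt[1]
--
--     mszam[s] = 1
--     visit(s)
--     for w in range(n):
--         if mszam[w] is None:
--             cnt[0] += 1; mszam[w] = cnt[0]
--             visit(w)
--     return elozo, mszam, bszam
-- ===== Notes on version B (the rewrite author's own statement) =====
-- stated objective: simpler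
-- what changed: A drives the DFS with a flat while-loop over a per-vertex resume array kszom, an explicit current-vertex variable and backtracking through elozo parent pointers; B is a recursive visit(v) helper (elozo kept purely as output data) with a plain root scan over range(n), so all of A's resume/backtrack control machinery disappears.
import Mathlib
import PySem

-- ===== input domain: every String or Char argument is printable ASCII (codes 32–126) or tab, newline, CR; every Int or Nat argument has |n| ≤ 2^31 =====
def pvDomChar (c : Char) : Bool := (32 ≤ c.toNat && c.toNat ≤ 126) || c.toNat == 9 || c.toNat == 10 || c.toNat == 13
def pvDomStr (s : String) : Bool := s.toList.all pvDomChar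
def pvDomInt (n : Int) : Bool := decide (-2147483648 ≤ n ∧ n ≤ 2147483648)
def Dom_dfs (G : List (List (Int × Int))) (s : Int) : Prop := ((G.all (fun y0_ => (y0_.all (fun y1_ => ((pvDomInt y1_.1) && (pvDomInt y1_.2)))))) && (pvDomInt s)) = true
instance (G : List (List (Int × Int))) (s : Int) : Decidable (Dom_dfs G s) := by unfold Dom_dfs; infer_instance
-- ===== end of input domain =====

-- B replaces A's flat while-loop (resume array kszom + backtracking through the elozo parent
-- pointers) by a recursive visit helper plus a plain root scan; return value only, no mutation.

-- Python list index (only single wraparound for negative i is ever reachable inside Pre_dfs)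
def pvWrap (n : Nat) (v : Int) : Nat := (if v < 0 then v + n else v).toNat

-- Python `mszam[v] > mszam[u]` on two int-or-None cells (both are ints whenever evaluated)
def pvGT (a b : Option Int) : Bool :=
  match a, b with
  | some x, some y => decide (y < x)
  | _, _ => false

-- A's root scan `for w in range(kcsucs, n): if mszam[w] is None: …`
def pvScan (mszam : List (Option Int)) (kcsucs n : Nat) : Option Nat :=
  (List.range' kcsucs (n - kcsucs)).find? (fun w => (mszam.getD w none).isNone)

-- ===== PORT A =====
-- A's while-loop; one fuel tick = one iteration of the inner `for` (resume point kszom[v]) or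
-- one finish/backtrack/root-scan step.  Where Python raises, the current triple is returned
-- (those inputs are outside Pre_dfs).  Fuel exhaustion likewise (it never occurs: see fuel bound in dfs).
def dfsALoop (G : List (List (Int × Int))) (n : Nat) :
    Nat → List (Option Int) → List (Option Int) → List (Option Int) → List Nat → Int → Int → Int → Nat →
    List (Option Int) × List (Option Int) × List (Option Int)
  | 0, mszam, bszam, elozo, _, _, _, _, _ => (elozo, mszam, bszam)
  | fuel+1, mszam, bszam, elozo, kszom, M, B, v, kcsucs =>
    if kszom.getD (pvWrap n v) 0 < (G.getD (pvWrap n v) []).length then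
      if mszam.getD (pvWrap n ((G.getD (pvWrap n v) []).getD (kszom.getD (pvWrap n v) 0) (0, 0)).1) none = none then
        dfsALoop G n fuel
          (mszam.set (pvWrap n ((G.getD (pvWrap n v) []).getD (kszom.getD (pvWrap n v) 0) (0, 0)).1) (some (M+1)))
          bszam
          (elozo.set (pvWrap n ((G.getD (pvWrap n v) []).getD (kszom.getD (pvWrap n v) 0) (0, 0)).1) (some v))
          (kszom.set (pvWrap n v) (kszom.getD (pvWrap n v) 0 + 1))
          (M+1) B ((G.getD (pvWrap n v) []).getD (kszom.getD (pvWrap n v) 0) (0, 0)).1 kcsucs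
      else if pvGT (mszam.getD (pvWrap n v) none)
                   (mszam.getD (pvWrap n ((G.getD (pvWrap n v) []).getD (kszom.getD (pvWrap n v) 0) (0, 0)).1) none) = true ∧
              bszam.getD (pvWrap n ((G.getD (pvWrap n v) []).getD (kszom.getD (pvWrap n v) 0) (0, 0)).1) none = none then
        (elozo, mszam, bszam)  -- Python: raise Exception(…)
      else
        dfsALoop G n fuel mszam bszam elozo (kszom.set (pvWrap n v) (kszom.getD (pvWrap n v) 0 + 1)) M B v kcsucs
    else
      match elozo.getD (pvWrap n v) none with
      | some p => dfsALoop G n fuel mszam (bszam.set (pvWrap n v) (some (B+1))) elozo kszom M (B+1) p kcsucs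
      | none =>
        match pvScan mszam kcsucs n with
        | some w => dfsALoop G n fuel (mszam.set w (some (M+1))) (bszam.set (pvWrap n v) (some (B+1))) elozo kszom
                      (M+1) (B+1) (w : Int) (w+1)
        | none => (elozo, mszam, bszam.set (pvWrap n v) (some (B+1)))

def dfs (G : List (List (Int × Int))) (s : Int) : List (Option Int) × List (Option Int) × List (Option Int) :=
  dfsALoop G G.length ((G.map List.length).sum + G.length + 2)
    ((List.replicate G.length (none : Option Int)).set (pvWrap G.length s) (some 1))
    (List.replicate G.length none) (List.replicate G.length none) (List.replicate G.length 0)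
    1 0 s 0

-- ===== PORT B =====
-- B's mutable state (mszam, bszam, elozo, and the two counters of cnt)
structure DState where
  ms : List (Option Int)
  bs : List (Option Int)
  el : List (Option Int)
  m  : Int
  b  : Int

-- `cnt[0] += 1; mszam[u] = cnt[0]`
def pvMark (n : Nat) (u : Int) (st : DState) : DState :=
  { st with m := st.m + 1, ms := st.ms.set (pvWrap n u) (some (st.m + 1)) }

-- `elozo[u] = v`
def pvSetPar (n : Nat) (u v : Int) (st : DState) : DState :=
  { st with el := st.el.set (pvWrap n u) (some v) }

-- `cnt[1] += 1; bszam[v] = cnt[1]`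
def pvFinish (n : Nat) (v : Int) (st : DState) : DState :=
  { st with b := st.b + 1, bs := st.bs.set (pvWrap n v) (some (st.b + 1)) }

-- `mszam[v] > mszam[u] and bszam[u] is None`
def pvIsBack (n : Nat) (v u : Int) (st : DState) : Bool :=
  pvGT (st.ms.getD (pvWrap n v) none) (st.ms.getD (pvWrap n u) none) &&
    (st.bs.getD (pvWrap n u) none).isNone

-- B's recursive `visit(v)`, iterating over the still-unprocessed suffix of G[v].
-- The Python recursion carries no fuel; here fuel makes it total and is threaded as
-- (state, ticks consumed, raised?): a recursive call runs on fuel-1 and the remaining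
-- edges continue on what it left.  Inside Pre_dfs the fuel of dfs_alt never runs out;
-- on exhaustion (and on Python's raise) the current state is returned flagged.
def visitB (G : List (List (Int × Int))) (n : Nat) :
    Nat → Int → List (Int × Int) → DState → DState × Nat × Bool
  | 0, _, _, st => (st, 0, true)
  | _+1, v, [], st => (pvFinish n v st, 1, false)
  | fuel+1, v, e :: es, st =>
    if (st.ms.getD (pvWrap n e.1) none).isNone then
      match visitB G n fuel e.1 (G.getD (pvWrap n e.1) []) (pvSetPar n e.1 v (pvMark n e.1 st)) with
      | (st2, _, true) => (st2, 0, true)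
      | (st2, c, false) =>
        match visitB G n (fuel - c) v es st2 with
        | (st3, c', r) => (st3, 1 + c + c', r)
    else if pvIsBack n v e.1 st then
      (st, 0, true)  -- Python: raise Exception(…)
    else
      match visitB G n fuel v es st with
      | (st2, c, r) => (st2, 1 + c, r)
  termination_by fuel _ es _ => (fuel, es.length)
  decreasing_by
  · exact Prod.Lex.left _ _ (Nat.lt_succ_self fuel)
  · exact Prod.Lex.left _ _ (Nat.lt_succ_of_le (Nat.sub_le fuel c))
  · exact Prod.Lex.left _ _ (Nat.lt_succ_self fuel)

-- `for w in range(n): if mszam[w] is None: … visit(w)`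
def rootsB (G : List (List (Int × Int))) (n : Nat) :
    List Nat → Nat → DState → List (Option Int) × List (Option Int) × List (Option Int)
  | [], _, st => (st.el, st.ms, st.bs)
  | w :: ws, fuel, st =>
    if (st.ms.getD w none).isNone then
      match visitB G n fuel (w : Int) (G.getD w []) (pvMark n (w : Int) st) with
      | (st2, _, true) => (st2.el, st2.ms, st2.bs)
      | (st2, c, false) => rootsB G n ws (fuel - c) st2
    else rootsB G n ws fuel st

def dfs_alt (G : List (List (Int × Int))) (s : Int) : List (Option Int) × List (Option Int) × List (Option Int) :=
  match visitB G G.length ((G.map List.length).sum + G.length + 2) s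
      (G.getD (pvWrap G.length s) [])
      ⟨(List.replicate G.length (none : Option Int)).set (pvWrap G.length s) (some 1),
       List.replicate G.length none, List.replicate G.length none, 1, 0⟩ with
  | (st1, _, true) => (st1.el, st1.ms, st1.bs)
  | (st1, c, false) => rootsB G G.length (List.range G.length) ((G.map List.length).sum + G.length + 2 - c) st1

-- ===== PRECONDITION & SPEC =====
-- successors of a cell, as cells (after Python's negative-index wraparound)
def pvSucc (G : List (List (Int × Int))) (n c : Nat) : List Nat :=
  (G.getD c []).map (fun e => pvWrap n e.1)

-- cells reachable from R in at most `steps` steps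
def pvReach (G : List (List (Int × Int))) (n : Nat) : Nat → List Nat → List Nat
  | 0, R => R
  | steps+1, R => pvReach G n steps ((R ++ R.flatMap (pvSucc G n)).dedup)

-- a directed cycle through ≥ 2 distinct cells exists (self-loops do not count: A never flags u = v)
def pvHasCycle (G : List (List (Int × Int))) (n : Nat) : Bool :=
  (List.range n).any (fun c => (pvSucc G n c).any (fun d => d ≠ c && decide (c ∈ pvReach G n n [d])))

-- Pre_dfs = exactly the inputs where Python A returns normally: s a valid (possibly negative) index,
-- every edge target a valid index (else IndexError), and no cycle of length ≥ 2 (else A's Hungarian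
-- back-edge Exception).  Both A and B raise identically outside Pre_dfs.
def Pre_dfs (G : List (List (Int × Int))) (s : Int) : Prop :=
  0 < G.length ∧ -(G.length : Int) ≤ s ∧ s < (G.length : Int) ∧
  (∀ adj ∈ G, ∀ e ∈ adj, -(G.length : Int) ≤ e.1 ∧ e.1 < (G.length : Int)) ∧
  pvHasCycle G G.length = false
instance (G : List (List (Int × Int))) (s : Int) : Decidable (Pre_dfs G s) := by unfold Pre_dfs; infer_instance

def pvWitness_dfs : (List (List (Int × Int))) × Int := ([[(1, 7)], []], 0)

def Spec_dfs (G : List (List (Int × Int))) (s : Int) (out : List (Option Int) × List (Option Int) × List (Option Int)) : Prop := out = dfs_alt G s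
instance (G : List (List (Int × Int))) (s : Int) (out : List (Option Int) × List (Option Int) × List (Option Int)) : Decidable (Spec_dfs G s out) := by unfold Spec_dfs; infer_instance

-- ===== CLAIM (what is proved, stated in full; the proofs are below) =====
def Claim_equal_dfs : Prop := ∀ (G : List (List (Int × Int))) (s : Int), Dom_dfs G s → Pre_dfs G s → Spec_dfs G s (dfs G s)

-- ===== LEMMAS AND PROOFS =====

lemma getD_set_self {α : Type} (l : List α) (i : Nat) (x d : α) (h : i < l.length) :
    (l.set i x).getD i d = x := by
  simp [List.getD_eq_getElem?_getD, h]

lemma getD_set_ne {α : Type} (l : List α) {i j : Nat} (x d : α) (h : i ≠ j) :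
    (l.set i x).getD j d = l.getD j d := by
  simp [List.getD_eq_getElem?_getD, List.getElem?_set_ne h]

lemma getD_isSome_lt {α : Type} {l : List (Option α)} {i : Nat} (h : l.getD i none ≠ none) :
    i < l.length := by
  by_contra hc
  rw [List.getD_eq_default _ _ (by omega)] at h
  exact h rfl

lemma pvWrap_lt {n : Nat} {u : Int} (h1 : -(n : Int) ≤ u) (h2 : u < (n : Int)) : pvWrap n u < n := by
  unfold pvWrap; split <;> omega

lemma pvWrap_natCast (n w : Nat) : pvWrap n (w : Int) = w := by
  unfold pvWrap; split <;> omega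

lemma pvScan_some {m : List (Option Int)} {kc n w : Nat} (h : pvScan m kc n = some w) :
    kc ≤ w ∧ w < n ∧ m.getD w none = none := by
  have hmem := List.mem_of_find?_eq_some h
  have hpred := List.find?_some h
  rw [List.mem_range'_1] at hmem
  simp only [Option.isNone_iff_eq_none] at hpred
  refine ⟨by omega, by omega, by simpa using hpred⟩

-- the chain of pending `visit` frames = A's elozo-chain, each carrying its kszom resume index
def Chain (n : Nat) (elozo : List (Option Int)) (kszom : List Nat) (mszam : List (Option Int)) :
    List (Int × Nat) → Prop
  | [] => True
  | (v, i) :: rest =>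
      i = kszom.getD (pvWrap n v) 0 ∧
      mszam.getD (pvWrap n v) none ≠ none ∧
      elozo.getD (pvWrap n v) none = (match rest with | [] => none | (p, _) :: _ => some p) ∧
      Chain n elozo kszom mszam rest

lemma Chain_isSome {n : Nat} {elozo : List (Option Int)} {kszom : List Nat} {mszam : List (Option Int)}
    {st : List (Int × Nat)} (h : Chain n elozo kszom mszam st) :
    ∀ q ∈ st, mszam.getD (pvWrap n q.1) none ≠ none := by
  induction st with
  | nil => intro q hq; cases hq
  | cons hd tl ih =>
    obtain ⟨v, i⟩ := hd
    intro q hq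
    rcases List.mem_cons.1 hq with rfl | hq'
    · exact h.2.1
    · exact ih h.2.2.2 q hq'

lemma Chain_of_updates {n : Nat} {elozo elozo' : List (Option Int)} {kszom kszom' : List Nat}
    {mszam mszam' : List (Option Int)} {st : List (Int × Nat)}
    (h : Chain n elozo kszom mszam st)
    (he : ∀ q ∈ st, elozo'.getD (pvWrap n q.1) none = elozo.getD (pvWrap n q.1) none)
    (hk : ∀ q ∈ st, kszom'.getD (pvWrap n q.1) 0 = kszom.getD (pvWrap n q.1) 0)
    (hm : ∀ q ∈ st, mszam'.getD (pvWrap n q.1) none = mszam.getD (pvWrap n q.1) none) :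
    Chain n elozo' kszom' mszam' st := by
  induction st with
  | nil => trivial
  | cons hd tl ih =>
    obtain ⟨v, i⟩ := hd
    obtain ⟨h1, h2, h3, h4⟩ := h
    refine ⟨?_, ?_, ?_, ?_⟩
    · rw [hk (v, i) (List.mem_cons_self ..)]; exact h1
    · rw [hm (v, i) (List.mem_cons_self ..)]; exact h2
    · rw [he (v, i) (List.mem_cons_self ..)]; exact h3
    · exact ih h4 (fun q hq => he q (List.mem_cons_of_mem _ hq))
        (fun q hq => hk q (List.mem_cons_of_mem _ hq)) (fun q hq => hm q (List.mem_cons_of_mem _ hq))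

lemma Chain_cons {n : Nat} {elozo : List (Option Int)} {kszom : List Nat} {mszam : List (Option Int)}
    {v : Int} {i : Nat} {rest : List (Int × Nat)}
    (h1 : i = kszom.getD (pvWrap n v) 0)
    (h2 : mszam.getD (pvWrap n v) none ≠ none)
    (h3 : elozo.getD (pvWrap n v) none = (match rest with | [] => none | (p, _) :: _ => some p))
    (h4 : Chain n elozo kszom mszam rest) :
    Chain n elozo kszom mszam ((v, i) :: rest) := ⟨h1, h2, h3, h4⟩

-- proof-only continuation view of B: run the pending visit frames, then the root scan from kc
def contB (G : List (List (Int × Int))) (n : Nat) :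
    List (Int × Nat) → Nat → Nat → DState → List (Option Int) × List (Option Int) × List (Option Int)
  | [], kc, fuel, st => rootsB G n (List.range' kc (n - kc)) fuel st
  | (v, i) :: rest, kc, fuel, st =>
    match visitB G n fuel v ((G.getD (pvWrap n v) []).drop i) st with
    | (st2, _, true) => (st2.el, st2.ms, st2.bs)
    | (st2, c, false) => contB G n rest kc (fuel - c) st2

lemma contB_zero (G : List (List (Int × Int))) (n : Nat) (v : Int) (i : Nat)
    (rest : List (Int × Nat)) (kc : Nat) (st : DState) :
    contB G n ((v, i) :: rest) kc 0 st = (st.el, st.ms, st.bs) := by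
  simp [contB, visitB]

lemma drop_cons_of_lt {l : List (Int × Int)} {i : Nat} (h : i < l.length) :
    l.drop i = l.getD i (0, 0) :: l.drop (i + 1) := by
  rw [List.getD_eq_getElem _ _ h, List.drop_eq_getElem_cons h]

lemma contB_skip (G : List (List (Int × Int))) (n : Nat) (v : Int) (i : Nat)
    (rest : List (Int × Nat)) (kc fuel : Nat) (st : DState)
    (hlt : i < (G.getD (pvWrap n v) []).length)
    (hnd : ¬ st.ms.getD (pvWrap n ((G.getD (pvWrap n v) []).getD i (0, 0)).1) none = none)
    (hnb : pvIsBack n v ((G.getD (pvWrap n v) []).getD i (0, 0)).1 st = false) :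
    contB G n ((v, i) :: rest) kc (fuel + 1) st = contB G n ((v, i + 1) :: rest) kc fuel st := by
  simp only [contB, drop_cons_of_lt hlt]
  rw [visitB]
  rw [if_neg (by simp only [Option.isNone_iff_eq_none]; exact hnd),
    if_neg (by rw [hnb]; exact Bool.false_ne_true)]
  rcases h : visitB G n fuel v ((G.getD (pvWrap n v) []).drop (i + 1)) st with ⟨st2, c, r⟩
  cases r
  · show contB G n rest kc (fuel + 1 - (1 + c)) st2 = contB G n rest kc (fuel - c) st2
    congr 1
    omega
  · rfl

lemma contB_disc (G : List (List (Int × Int))) (n : Nat) (v : Int) (i : Nat)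
    (rest : List (Int × Nat)) (kc fuel : Nat) (st : DState)
    (hlt : i < (G.getD (pvWrap n v) []).length)
    (hd : st.ms.getD (pvWrap n ((G.getD (pvWrap n v) []).getD i (0, 0)).1) none = none) :
    contB G n ((v, i) :: rest) kc (fuel + 1) st =
      contB G n ((((G.getD (pvWrap n v) []).getD i (0, 0)).1, 0) :: (v, i + 1) :: rest) kc fuel
        (pvSetPar n ((G.getD (pvWrap n v) []).getD i (0, 0)).1 v
          (pvMark n ((G.getD (pvWrap n v) []).getD i (0, 0)).1 st)) := by
  simp only [contB, drop_cons_of_lt hlt, List.drop_zero]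
  rw [visitB]
  rw [if_pos (Option.isNone_iff_eq_none.mpr hd)]
  rcases h1 : visitB G n fuel ((G.getD (pvWrap n v) []).getD i (0, 0)).1
      (G.getD (pvWrap n ((G.getD (pvWrap n v) []).getD i (0, 0)).1) [])
      (pvSetPar n ((G.getD (pvWrap n v) []).getD i (0, 0)).1 v
        (pvMark n ((G.getD (pvWrap n v) []).getD i (0, 0)).1 st)) with ⟨st2, c, r⟩
  cases r
  · rcases h2 : visitB G n (fuel - c) v ((G.getD (pvWrap n v) []).drop (i + 1)) st2 with ⟨st3, c', r'⟩
    cases r'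
    · simp only [h2]
      congr 1
      omega
    · simp only [h2]
  · rfl

lemma contB_back (G : List (List (Int × Int))) (n : Nat) (v : Int) (i : Nat)
    (rest : List (Int × Nat)) (kc fuel : Nat) (st : DState)
    (hlt : i < (G.getD (pvWrap n v) []).length)
    (hnd : ¬ st.ms.getD (pvWrap n ((G.getD (pvWrap n v) []).getD i (0, 0)).1) none = none)
    (hb : pvIsBack n v ((G.getD (pvWrap n v) []).getD i (0, 0)).1 st = true) :
    contB G n ((v, i) :: rest) kc (fuel + 1) st = (st.el, st.ms, st.bs) := by
  simp only [contB, drop_cons_of_lt hlt]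
  rw [visitB]
  rw [if_neg (by simp only [Option.isNone_iff_eq_none]; exact hnd), if_pos hb]

lemma contB_fin (G : List (List (Int × Int))) (n : Nat) (v : Int) (i : Nat)
    (rest : List (Int × Nat)) (kc fuel : Nat) (st : DState)
    (hge : ¬ i < (G.getD (pvWrap n v) []).length) :
    contB G n ((v, i) :: rest) kc (fuel + 1) st = contB G n rest kc fuel (pvFinish n v st) := by
  have hdrop : (G.getD (pvWrap n v) []).drop i = [] := List.drop_eq_nil_of_le (by omega)
  simp only [contB, hdrop]
  rw [visitB]
  simp

lemma roots_corr (G : List (List (Int × Int))) (n : Nat) :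
    ∀ (d k fuel : Nat) (st : DState), n - k = d →
    rootsB G n (List.range' k (n - k)) fuel st =
      match pvScan st.ms k n with
      | none => (st.el, st.ms, st.bs)
      | some w => contB G n [((w : Int), 0)] (w + 1) fuel (pvMark n (w : Int) st) := by
  intro d
  induction d with
  | zero =>
    intro k fuel st hd
    rw [hd]
    simp [rootsB, pvScan, hd]
  | succ d ih =>
    intro k fuel st hd
    have h1 : n - k = d + 1 := hd
    rw [h1, List.range'_succ]
    have hscan : pvScan st.ms k n =
        if (st.ms.getD k none).isNone then some k
        else pvScan st.ms (k + 1) n := by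
      unfold pvScan
      rw [h1, List.range'_succ]
      by_cases hk : (st.ms.getD k none).isNone
      · rw [List.find?_cons_of_pos (by simpa using hk), if_pos hk]
      · rw [List.find?_cons_of_neg (by simpa using hk), if_neg hk]
        have h2 : n - (k + 1) = d := by omega
        rw [h2]
    by_cases hk : (st.ms.getD k none).isNone
    · rw [hscan, if_pos hk]
      simp only [rootsB]
      rw [if_pos hk]
      simp only [contB, List.drop_zero, pvWrap_natCast]
      rcases h2 : visitB G n fuel (k : Int) (G.getD k []) (pvMark n (k : Int) st) with ⟨st2, c, r⟩
      cases r
      · have : n - (k + 1) = d := by omega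
        simp [this]
      · rfl
    · rw [hscan, if_neg hk]
      simp only [rootsB]
      rw [if_neg hk]
      have : n - (k + 1) = d := by omega
      rw [← this]
      exact ih (k + 1) fuel st (by omega)

lemma bisim (G : List (List (Int × Int))) (n : Nat) (hG : G.length = n)
    (hE : ∀ adj ∈ G, ∀ e ∈ adj, -(n : Int) ≤ e.1 ∧ e.1 < (n : Int)) :
    ∀ (fuel : Nat) (mszam bszam elozo : List (Option Int)) (kszom : List Nat) (M B v : Int)
      (kcsucs i : Nat) (rest : List (Int × Nat)),
      mszam.length = n → bszam.length = n → elozo.length = n → kszom.length = n →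
      i = kszom.getD (pvWrap n v) 0 →
      Chain n elozo kszom mszam ((v, i) :: rest) →
      (((v, i) :: rest).map (fun q => pvWrap n q.1)).Nodup →
      (∀ c, c < n → mszam.getD c none = none → kszom.getD c 0 = 0 ∧ elozo.getD c none = none) →
      dfsALoop G n fuel mszam bszam elozo kszom M B v kcsucs =
      contB G n ((v, i) :: rest) kcsucs fuel ⟨mszam, bszam, elozo, M, B⟩ := by
  intro fuel
  induction fuel with
  | zero =>
    intro mszam bszam elozo kszom M B v kcsucs i rest _ _ _ _ _ _ _ _
    rw [contB_zero]
    simp [dfsALoop]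
  | succ fuel ih =>
    intro mszam bszam elozo kszom M B v kcsucs i rest hlm hlb hle hlk hik hch hnd hfresh
    obtain ⟨_, hvsome, helz, hrest⟩ := hch
    subst hik
    have hvi : pvWrap n v < n := by have := getD_isSome_lt hvsome; omega
    have hnd0 : pvWrap n v ∉ rest.map (fun q => pvWrap n q.1) ∧
        (rest.map (fun q => pvWrap n q.1)).Nodup := by
      rw [List.map_cons, List.nodup_cons] at hnd
      exact hnd
    simp only [dfsALoop]
    by_cases hlt : kszom.getD (pvWrap n v) 0 < (G.getD (pvWrap n v) []).length
    · -- edge step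
      have hadj : G.getD (pvWrap n v) [] ∈ G := by
        rw [List.getD_eq_getElem G [] (by omega)]
        exact List.getElem_mem _
      have hedge : (G.getD (pvWrap n v) []).getD (kszom.getD (pvWrap n v) 0) (0, 0) ∈
          G.getD (pvWrap n v) [] := by
        rw [List.getD_eq_getElem _ _ hlt]
        exact List.getElem_mem _
      have hu := hE _ hadj _ hedge
      have hui : pvWrap n ((G.getD (pvWrap n v) []).getD (kszom.getD (pvWrap n v) 0) (0, 0)).1 < n :=
        pvWrap_lt hu.1 hu.2
      set u := ((G.getD (pvWrap n v) []).getD (kszom.getD (pvWrap n v) 0) (0, 0)).1 with hudef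
      rw [if_pos hlt]
      by_cases hdisc : mszam.getD (pvWrap n u) none = none
      · -- discovery of u
        rw [if_pos hdisc]
        rw [contB_disc G n v _ rest kcsucs fuel _ hlt hdisc]
        have hneuv : pvWrap n u ≠ pvWrap n v := fun heq => hvsome (heq ▸ hdisc)
        have hnotin : ∀ q ∈ (v, kszom.getD (pvWrap n v) 0) :: rest, pvWrap n u ≠ pvWrap n q.1 := by
          intro q hq heq
          exact Chain_isSome (Chain_cons rfl hvsome helz hrest) q hq (heq ▸ hdisc)
        have hres := ih
          (mszam.set (pvWrap n u) (some (M+1))) bszam (elozo.set (pvWrap n u) (some v))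
          (kszom.set (pvWrap n v) (kszom.getD (pvWrap n v) 0 + 1)) (M+1) B u kcsucs
          0 ((v, kszom.getD (pvWrap n v) 0 + 1) :: rest)
          (by simpa using hlm) hlb (by simpa using hle) (by simpa using hlk)
          (by rw [getD_set_ne _ _ _ (Ne.symm hneuv)]; exact ((hfresh _ hui hdisc).1).symm)
          ?_ ?_ ?_
        · rw [hres]
          rfl
        · refine Chain_cons ?_ ?_ ?_ (Chain_cons ?_ ?_ ?_ ?_)
          · rw [getD_set_ne _ _ _ (Ne.symm hneuv)]
            exact ((hfresh _ hui hdisc).1).symm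
          · rw [getD_set_self _ _ _ _ (by omega)]
            simp
          · rw [getD_set_self _ _ _ _ (by omega)]
          · rw [getD_set_self _ _ _ _ (by omega)]
          · rw [getD_set_ne _ _ _ hneuv]
            exact hvsome
          · rw [getD_set_ne _ _ _ hneuv]
            exact helz
          · refine Chain_of_updates hrest ?_ ?_ ?_
            · intro q hq
              exact getD_set_ne _ _ _ (hnotin q (List.mem_cons_of_mem _ hq))
            · intro q hq
              refine getD_set_ne _ _ _ (fun heq => ?_)
              exact hnd0.1 (heq ▸ List.mem_map_of_mem hq)
            · intro q hq
              exact getD_set_ne _ _ _ (hnotin q (List.mem_cons_of_mem _ hq))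
        · rw [List.map_cons, List.map_cons, List.nodup_cons, List.nodup_cons]
          refine ⟨?_, hnd0.1, hnd0.2⟩
          intro hmem
          rcases List.mem_cons.1 hmem with heq | hmem'
          · exact hneuv heq
          · simp only [List.mem_map] at hmem'
            obtain ⟨q, hq, heq⟩ := hmem'
            exact hnotin q (List.mem_cons_of_mem _ hq) heq.symm
        · intro c hc hcm
          have hcne : c ≠ pvWrap n u := by
            intro heq
            rw [heq, getD_set_self _ _ _ _ (by omega)] at hcm
            cases hcm
          rw [getD_set_ne _ _ _ (Ne.symm hcne)] at hcm
          have hcnv : c ≠ pvWrap n v := fun heq => hvsome (heq ▸ hcm)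
          refine ⟨?_, ?_⟩
          · rw [getD_set_ne _ _ _ (Ne.symm hcnv)]
            exact (hfresh c hc hcm).1
          · rw [getD_set_ne _ _ _ (Ne.symm hcne)]
            exact (hfresh c hc hcm).2
      · -- u already discovered
        rw [if_neg hdisc]
        by_cases hback : pvGT (mszam.getD (pvWrap n v) none) (mszam.getD (pvWrap n u) none) = true ∧
            bszam.getD (pvWrap n u) none = none
        · rw [if_pos hback]
          have hb : pvIsBack n v u ⟨mszam, bszam, elozo, M, B⟩ = true := by
            show (pvGT (mszam.getD (pvWrap n v) none) (mszam.getD (pvWrap n u) none) &&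
              (bszam.getD (pvWrap n u) none).isNone) = true
            rw [hback.1, hback.2]
            rfl
          rw [contB_back G n v _ rest kcsucs fuel _ hlt hdisc hb]
        · rw [if_neg hback]
          have hnb : pvIsBack n v u ⟨mszam, bszam, elozo, M, B⟩ = false := by
            show (pvGT (mszam.getD (pvWrap n v) none) (mszam.getD (pvWrap n u) none) &&
              (bszam.getD (pvWrap n u) none).isNone) = false
            by_cases h1 : pvGT (mszam.getD (pvWrap n v) none) (mszam.getD (pvWrap n u) none) = true
            · cases hbs : bszam.getD (pvWrap n u) none with
              | none => exact absurd ⟨h1, hbs⟩ hback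
              | some x => rw [h1]; rfl
            · rw [Bool.eq_false_iff.mpr h1]; rfl
          rw [contB_skip G n v _ rest kcsucs fuel _ hlt hdisc hnb]
          apply ih
          · exact hlm
          · exact hlb
          · exact hle
          · simpa using hlk
          · rw [getD_set_self _ _ _ _ (by omega)]
          · refine Chain_cons ?_ hvsome helz ?_
            · rw [getD_set_self _ _ _ _ (by omega)]
            · refine Chain_of_updates hrest (fun q _ => rfl) ?_ (fun q _ => rfl)
              intro q hq
              refine getD_set_ne _ _ _ (fun heq => ?_)
              exact hnd0.1 (heq ▸ List.mem_map_of_mem hq)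
          · exact hnd
          · intro c hc hcm
            have hcnv : c ≠ pvWrap n v := fun heq => hvsome (heq ▸ hcm)
            refine ⟨?_, (hfresh c hc hcm).2⟩
            rw [getD_set_ne _ _ _ (Ne.symm hcnv)]
            exact (hfresh c hc hcm).1
    · -- finish step
      rw [if_neg hlt]
      rw [contB_fin G n v _ rest kcsucs fuel _ hlt]
      match rest, helz, hrest, hnd0 with
      | [], helz, _, _ =>
        rw [helz]
        have hroot := roots_corr G n (n - kcsucs) kcsucs fuel
          (pvFinish n v ⟨mszam, bszam, elozo, M, B⟩) rfl
        simp only [contB]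
        rw [hroot]
        have hms : (pvFinish n v ⟨mszam, bszam, elozo, M, B⟩).ms = mszam := rfl
        rw [hms]
        cases hscan : pvScan mszam kcsucs n with
        | none => rfl
        | some w =>
          obtain ⟨hkw, hwn, hwnone⟩ := pvScan_some hscan
          have hres := ih
            (mszam.set w (some (M+1))) (bszam.set (pvWrap n v) (some (B+1))) elozo kszom
            (M+1) (B+1) (w : Int) (w+1) 0 []
            (by simpa using hlm) (by simpa using hlb) hle hlk
            (by rw [pvWrap_natCast]; exact ((hfresh w hwn hwnone).1).symm)
            ?_ ?_ ?_
          · simp only [hres]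
            simp only [pvMark, pvFinish, pvWrap_natCast]
          · refine Chain_cons ?_ ?_ ?_ trivial
            · rw [pvWrap_natCast]
              exact ((hfresh w hwn hwnone).1).symm
            · rw [pvWrap_natCast, getD_set_self _ _ _ _ (by omega)]
              simp
            · rw [pvWrap_natCast]
              exact (hfresh w hwn hwnone).2
          · simp
          · intro c hc hcm
            have hcne : c ≠ w := by
              intro heq
              rw [heq, getD_set_self _ _ _ _ (by omega)] at hcm
              cases hcm
            rw [getD_set_ne _ _ _ (Ne.symm hcne)] at hcm
            exact hfresh c hc hcm
      | (p, j) :: qs, helz, hrest, hnd0 =>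
        rw [helz]
        have hij : j = kszom.getD (pvWrap n p) 0 := hrest.1
        have hres := ih mszam (bszam.set (pvWrap n v) (some (B+1))) elozo kszom M (B+1) p kcsucs
          j qs hlm (by simpa using hlb) hle hlk hij hrest
          (by exact (List.nodup_cons.mp (by simpa using hnd)).2) hfresh
        simp only [hres]
        rfl

theorem dfs_eq_alt (G : List (List (Int × Int))) (s : Int) (h : Pre_dfs G s) :
    dfs G s = dfs_alt G s := by
  obtain ⟨hn, hs1, hs2, hE, _⟩ := h
  have hws : pvWrap G.length s < G.length := pvWrap_lt hs1 hs2
  have hbis := bisim G G.length rfl hE ((G.map List.length).sum + G.length + 2)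
    ((List.replicate G.length (none : Option Int)).set (pvWrap G.length s) (some 1))
    (List.replicate G.length none) (List.replicate G.length none) (List.replicate G.length 0)
    1 0 s 0 0 []
    (by simp) (by simp) (by simp) (by simp)
    (by simp [List.getD_eq_getElem?_getD, List.getElem?_replicate]; split <;> rfl)
    ?_ (by simp) ?_
  · rw [dfs, hbis]
    simp only [contB, List.drop_zero]
    rcases hv : visitB G G.length ((G.map List.length).sum + G.length + 2) s
        (G.getD (pvWrap G.length s) [])
        ⟨(List.replicate G.length (none : Option Int)).set (pvWrap G.length s) (some 1),
         List.replicate G.length none, List.replicate G.length none, 1, 0⟩ with ⟨st1, c, r⟩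
    cases r
    · rw [dfs_alt, hv]
      simp [List.range_eq_range']
    · rw [dfs_alt, hv]
  · refine ⟨?_, ?_, ?_, trivial⟩
    · simp [List.getD_eq_getElem?_getD, List.getElem?_replicate]
      split <;> rfl
    · rw [getD_set_self _ _ _ _ (by simpa using hws)]
      simp
    · simp [List.getD_eq_getElem?_getD, List.getElem?_replicate]
      split <;> rfl
  · intro c hc _
    constructor <;> simp [List.getD_eq_getElem?_getD, List.getElem?_replicate] <;> split <;> rfl

-- ===== VERDICT (by name: the statement is the Claim_ definition above) =====
theorem dfs_spec : Claim_equal_dfs := by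
  intro G s _ hpre
  unfold Spec_dfs
  exact dfs_eq_alt G s hpre
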